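-- pv_equiv track=rewrite | github.com/soyukke/lean-unsolved | scripts/collatz_mod64_ascent.py | hensel_prediction
-- ===== SOURCE A (Python) =====
-- def hensel_prediction(r, mod):
--     """
--     Hensel attrition による予測:
--     k回連続上昇 ⟺ n ≡ 2^{k+1} - 1 (mod 2^{k+1})
--
--     r mod mod での予測連続上昇回数を返す。
--     """
--     # n ≡ r (mod mod) のとき、最大何回連続上昇するか
--     # k回連続上昇の条件: n ≡ -1 (mod 4), n ≡ -1 (mod 8), ..., n ≡ -1 (mod 2^{k+1})
--     # つまり n ≡ 2^{k+1}-1 (mod 2^{k+1})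
--
--     # r mod 4 ≠ 3 なら k=0
--     # r mod 4 = 3 かつ r mod 8 ≠ 7 なら k=1
--     # r mod 8 = 7 かつ r mod 16 ≠ 15 なら k=2
--     # etc.
--
--     k = 0
--     power = 4  # 2^{k+1} starts at 2^1=2, but condition is mod 2^{k+1}
--     while power <= mod:
--         if r % power == power - 1:
--             k += 1
--             power *= 2
--         else:
--             break
--     return k
-- ===== SOURCE B (Python) =====
-- def hensel_prediction(r, mod):
--     # Closed-form cap from mod's bit length; trailing-ones of r via the
--     # 2-adic valuation of r+1, computed once by a halving loop.
--     if mod < 4: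
--         return 0
--     cap = mod.bit_length() - 2
--     if r == -1:
--         # r + 1 == 0: every congruence holds, the loop bound alone decides
--         return cap
--     t = 0
--     x = r + 1
--     while x % 2 == 0:
--         x //= 2
--         t += 1
--     return max(0, min(t - 1, cap))
-- ===== Notes on version B (the rewrite author's own statement) =====
-- stated objective: alternative
-- what changed: Replaces the doubling-power loop that interleaves the mod bound with successive congruence tests by a closed-form cap from mod's bit length plus one 2-adic-valuation (trailing-zeros of r+1) halving loop combined with max/min arithmetic.
import Mathlib
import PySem

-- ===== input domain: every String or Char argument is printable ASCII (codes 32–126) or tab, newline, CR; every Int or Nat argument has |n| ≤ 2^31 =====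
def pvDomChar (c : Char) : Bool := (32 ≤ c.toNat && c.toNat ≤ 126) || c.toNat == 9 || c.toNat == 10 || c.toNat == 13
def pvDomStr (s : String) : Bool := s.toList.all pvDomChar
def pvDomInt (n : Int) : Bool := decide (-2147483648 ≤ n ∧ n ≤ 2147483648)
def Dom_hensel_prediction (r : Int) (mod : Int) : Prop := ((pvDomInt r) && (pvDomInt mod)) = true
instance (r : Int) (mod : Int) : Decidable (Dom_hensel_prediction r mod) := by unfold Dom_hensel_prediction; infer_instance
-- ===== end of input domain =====

-- B replaces A's doubling-power loop by a closed-form cap from mod's bit length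
-- plus a single 2-adic-valuation loop on r+1 (objective: alternative algorithm).


-- ===== PORT A =====
-- Literal port of A's while loop ('while power <= mod: if r % power == power - 1: …').
-- The Nat fuel is a totality guard only: it starts at (mod + 1 - power).toNat, which
-- is an upper bound on the number of iterations (power ≥ 4 doubles each step), so the
-- fuel never runs out before the loop condition 'power ≤ mod' fails.
def henselLoopF (r mod k power : Int) (fuel : Nat) : Int :=
  match fuel with
  | 0 => k
  | f + 1 =>
    if power ≤ mod then
      if PySem.Int.mod r power = power - 1 then
        henselLoopF r mod (k + 1) (power * 2) f
      else k
    else k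

def henselLoop (r mod k power : Int) : Int :=
  henselLoopF r mod k power (mod + 1 - power).toNat

def hensel_prediction (r : Int) (mod : Int) : Int :=
  henselLoop r mod 0 4

-- ===== PORT B =====
-- 2-adic valuation loop of Source B ('while x % 2 == 0: x //= 2; t += 1'), returning the
-- final t.  The Nat fuel is a totality guard only: Source B runs this loop with
-- x = r + 1 ≠ 0, where x.natAbs bounds the number of halvings.
def twoAdicF (x : Int) (fuel : Nat) : Int :=
  match fuel with
  | 0 => 0
  | f + 1 =>
    if PySem.Int.mod x 2 = 0 then 1 + twoAdicF (PySem.Int.floordiv x 2) f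
    else 0

def twoAdic (x : Int) : Int :=
  twoAdicF x x.natAbs

def hensel_prediction_alt (r : Int) (mod : Int) : Int :=
  if mod < 4 then 0
  else if r = -1 then (PySem.Int.bitLength mod : Int) - 2
  else max 0 (min (twoAdic (r + 1) - 1) ((PySem.Int.bitLength mod : Int) - 2))

-- ===== PRECONDITION & SPEC =====
def Spec_hensel_prediction (r : Int) (mod : Int) (out : Int) : Prop := out = hensel_prediction_alt r mod
instance (r : Int) (mod : Int) (out : Int) : Decidable (Spec_hensel_prediction r mod out) := by unfold Spec_hensel_prediction; infer_instance

-- ===== CLAIM (what is proved, stated in full; the proofs are below) =====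
def Claim_equal_hensel_prediction : Prop := ∀ (r : Int) (mod : Int), Dom_hensel_prediction r mod → Spec_hensel_prediction r mod (hensel_prediction r mod)

-- ===== LEMMAS AND PROOFS =====

-- Python's 'r % p == p - 1' (p > 0) is exactly 'p divides r + 1'.
theorem pymod_eq_sub_one_iff (r p : Int) (hp : 0 < p) :
    PySem.Int.mod r p = p - 1 ↔ p ∣ (r + 1) := by
  rw [PySem.Int.mod_eq_emod_of_pos hp]
  constructor
  · intro h
    refine ⟨r / p + 1, ?_⟩
    have hd := Int.mul_ediv_add_emod r p
    rw [mul_add, mul_one]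
    omega
  · rintro ⟨c, hc⟩
    have hr : r = -1 + p * c := by omega
    rw [hr, Int.add_mul_emod_self_left]
    calc (-1 : Int) % p = ((p - 1) + p * (-1)) % p := by ring_nf
    _ = (p - 1) % p := Int.add_mul_emod_self_left (p - 1) p (-1)
    _ = p - 1 := Int.emod_eq_of_lt (by omega) (by omega)

-- fuel irrelevance for twoAdicF: any fuel ≥ |x| gives the same value (x ≠ 0)
theorem twoAdicF_congr : ∀ (f1 : Nat) (x : Int) (f2 : Nat), x ≠ 0 →
    x.natAbs ≤ f1 → x.natAbs ≤ f2 → twoAdicF x f1 = twoAdicF x f2 := by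
  intro f1
  induction f1 with
  | zero => intro x f2 hx h1 _; omega
  | succ f1' ih =>
    intro x f2 hx h1 h2
    have hfd : PySem.Int.floordiv x 2 = x / 2 :=
      PySem.Int.floordiv_eq_ediv_of_pos (by omega)
    cases f2 with
    | zero => omega
    | succ f2' =>
      show twoAdicF x (f1' + 1) = twoAdicF x (f2' + 1)
      rw [twoAdicF, twoAdicF]
      by_cases hmod : PySem.Int.mod x 2 = 0
      · rw [if_pos hmod, if_pos hmod, hfd]
        have hm : x % 2 = 0 := by
          rwa [PySem.Int.mod_eq_emod_of_pos (by omega)] at hmod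
        rw [ih (x / 2) f2' (by omega) (by omega) (by omega)]
      · rw [if_neg hmod, if_neg hmod]

-- one-step unfolding of twoAdic for x ≠ 0
theorem twoAdic_eq (x : Int) (hx : x ≠ 0) :
    twoAdic x = if PySem.Int.mod x 2 = 0 then 1 + twoAdic (PySem.Int.floordiv x 2)
                else 0 := by
  have hfd : PySem.Int.floordiv x 2 = x / 2 :=
    PySem.Int.floordiv_eq_ediv_of_pos (by omega)
  unfold twoAdic
  obtain ⟨n, hn⟩ : ∃ n, x.natAbs = n + 1 := ⟨x.natAbs - 1, by omega⟩
  rw [hn, twoAdicF]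
  by_cases hmod : PySem.Int.mod x 2 = 0
  · rw [if_pos hmod, if_pos hmod, hfd]
    have hm : x % 2 = 0 := by
      rwa [PySem.Int.mod_eq_emod_of_pos (by omega)] at hmod
    rw [twoAdicF_congr n (x / 2) (x / 2).natAbs (by omega) (by omega) (by omega)]
  · rw [if_neg hmod, if_neg hmod]

theorem twoAdicF_nonneg (f : Nat) : ∀ (x : Int), 0 ≤ twoAdicF x f := by
  induction f with
  | zero => intro x; rw [twoAdicF]
  | succ f ih =>
    intro x
    rw [twoAdicF]
    by_cases hmod : PySem.Int.mod x 2 = 0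
    · rw [if_pos hmod]; have := ih (PySem.Int.floordiv x 2); omega
    · rw [if_neg hmod]

theorem twoAdic_nonneg (x : Int) : 0 ≤ twoAdic x := twoAdicF_nonneg x.natAbs x

-- 2^j divides x (x ≠ 0) iff j ≤ twoAdic x.
theorem twoAdic_dvd_iff_aux : ∀ (n : Nat) (x : Int), x.natAbs ≤ n → x ≠ 0 → ∀ (j : Nat),
    ((2 : Int) ^ j ∣ x ↔ (j : Int) ≤ twoAdic x) := by
  intro n
  induction n with
  | zero => intro x h1 hx; omega
  | succ n ih =>
    intro x h1 hx j
    rw [twoAdic_eq x hx]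
    have hfd : PySem.Int.floordiv x 2 = x / 2 :=
      PySem.Int.floordiv_eq_ediv_of_pos (by omega)
    by_cases hmod : PySem.Int.mod x 2 = 0
    · rw [if_pos hmod, hfd]
      have hm : x % 2 = 0 := by
        rwa [PySem.Int.mod_eq_emod_of_pos (by omega)] at hmod
      have hx2 : x = 2 * (x / 2) := by omega
      have hy0 : x / 2 ≠ 0 := by omega
      cases j with
      | zero =>
        simp only [pow_zero, one_dvd, Nat.cast_zero, true_iff]
        have := twoAdic_nonneg (x / 2)
        omega
      | succ j' =>
        have step : 2 * (2 : Int) ^ j' ∣ 2 * (x / 2) ↔ (2 : Int) ^ j' ∣ x / 2 :=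
          mul_dvd_mul_iff_left (show (2 : Int) ≠ 0 by norm_num)
        rw [← hx2] at step
        rw [pow_succ, mul_comm ((2 : Int) ^ j') 2, step,
          ih (x / 2) (by omega) hy0 j']
        push_cast
        omega
    · rw [if_neg hmod]
      have hm : x % 2 ≠ 0 := by
        rwa [PySem.Int.mod_eq_emod_of_pos (by omega)] at hmod
      cases j with
      | zero => simp
      | succ j' =>
        constructor
        · intro hdvd
          exfalso
          have h2 : (2 : Int) ∣ x := dvd_trans (dvd_pow_self 2 (Nat.succ_ne_zero j')) hdvd
          omega
        · intro hle
          exfalso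
          push_cast at hle
          omega

theorem twoAdic_dvd_iff (x : Int) (hx : x ≠ 0) (j : Nat) :
    (2 : Int) ^ j ∣ x ↔ (j : Int) ≤ twoAdic x :=
  twoAdic_dvd_iff_aux x.natAbs x (le_refl _) hx j

-- fuel irrelevance for henselLoopF (power > 0): any fuel ≥ (mod + 1 - power).toNat works
theorem henselLoopF_congr (r mod : Int) : ∀ (f1 : Nat) (k power : Int) (f2 : Nat),
    0 < power → (mod + 1 - power).toNat ≤ f1 → (mod + 1 - power).toNat ≤ f2 →
    henselLoopF r mod k power f1 = henselLoopF r mod k power f2 := by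
  intro f1
  induction f1 with
  | zero =>
    intro k power f2 hp h1 h2
    have hnle : ¬ power ≤ mod := by omega
    cases f2 with
    | zero => rfl
    | succ f2' => rw [henselLoopF, henselLoopF, if_neg hnle]
  | succ f1' ih =>
    intro k power f2 hp h1 h2
    by_cases hle : power ≤ mod
    · cases f2 with
      | zero => omega
      | succ f2' =>
        show henselLoopF r mod k power (f1' + 1) = henselLoopF r mod k power (f2' + 1)
        rw [henselLoopF, henselLoopF, if_pos hle, if_pos hle]
        by_cases htest : PySem.Int.mod r power = power - 1
        · rw [if_pos htest, if_pos htest]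
          exact ih (k + 1) (power * 2) f2' (by omega) (by omega) (by omega)
        · rw [if_neg htest, if_neg htest]
    · cases f2 with
      | zero => rw [henselLoopF, henselLoopF, if_neg hle]
      | succ f2' => rw [henselLoopF, henselLoopF, if_neg hle, if_neg hle]

-- one-step unfolding of henselLoop, matching the Python while loop (power > 0)
theorem henselLoop_eq (r mod k power : Int) (hp : 0 < power) :
    henselLoop r mod k power =
      if power ≤ mod then
        if PySem.Int.mod r power = power - 1 then henselLoop r mod (k + 1) (power * 2)
        else k
      else k := by
  unfold henselLoop
  by_cases hle : power ≤ mod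
  · rw [if_pos hle]
    obtain ⟨n, hn⟩ : ∃ n, (mod + 1 - power).toNat = n + 1 :=
      ⟨(mod + 1 - power).toNat - 1, by omega⟩
    rw [hn, henselLoopF, if_pos hle]
    by_cases htest : PySem.Int.mod r power = power - 1
    · rw [if_pos htest, if_pos htest]
      exact henselLoopF_congr r mod n (k + 1) (power * 2)
        (mod + 1 - power * 2).toNat (by omega) (by omega) (by omega)
    · rw [if_neg htest, if_neg htest]
  · rw [if_neg hle]
    have h0 : (mod + 1 - power).toNat = 0 := by omega
    rw [h0, henselLoopF]

-- mod ≥ 4 → bitLength mod ≥ 3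
theorem bitLength_ge_three (mod : Int) (h4 : 4 ≤ mod) : 3 ≤ PySem.Int.bitLength mod := by
  have hBL := PySem.Int.lt_two_pow_bitLength mod
  by_contra hlt
  have h2 : 2 ^ PySem.Int.bitLength mod ≤ 2 ^ 2 :=
    Nat.pow_le_pow_right (by norm_num) (by omega)
  omega

-- 2^j ≤ mod (mod ≥ 4) iff j ≤ bitLength mod - 1.
theorem pow_le_iff_le_bitLength (mod : Int) (h4 : 4 ≤ mod) (j : Nat) :
    (2 : Int) ^ j ≤ mod ↔ j ≤ PySem.Int.bitLength mod - 1 := by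
  have hBL := PySem.Int.lt_two_pow_bitLength mod
  have hBU := PySem.Int.two_pow_bitLength_le mod (by omega)
  have hB3 := bitLength_ge_three mod h4
  have hna : (mod.natAbs : Int) = mod := Int.natAbs_of_nonneg (by omega)
  have hcast : ((2 : Int) ^ j ≤ mod) ↔ (2 ^ j ≤ mod.natAbs) := by
    rw [← hna]
    exact_mod_cast Iff.rfl
  rw [hcast]
  constructor
  · intro h
    by_contra hgt
    have hle : 2 ^ PySem.Int.bitLength mod ≤ 2 ^ j :=
      Nat.pow_le_pow_right (by norm_num) (by omega)
    exact Nat.lt_irrefl _ (Nat.lt_of_lt_of_le hBL (Nat.le_trans hle h))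
  · intro h
    have hle : 2 ^ j ≤ 2 ^ (PySem.Int.bitLength mod - 1) :=
      Nat.pow_le_pow_right (by norm_num) h
    exact Nat.le_trans hle hBU

-- the last power index the loop can accept, as an Int
def loopBound (r mod : Int) : Int :=
  if r = -1 then ((PySem.Int.bitLength mod - 1 : Nat) : Int)
  else min (twoAdic (r + 1)) ((PySem.Int.bitLength mod - 1 : Nat) : Int)

theorem loopBound_lt (r mod : Int) (j : Nat) (hj : PySem.Int.bitLength mod - 1 < j) :
    loopBound r mod < (j : Int) := by
  have hcast : ((PySem.Int.bitLength mod - 1 : Nat) : Int) < (j : Int) :=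
    Nat.cast_lt.mpr hj
  unfold loopBound
  by_cases hr : r = -1
  · rw [if_pos hr]; exact hcast
  · rw [if_neg hr]; omega

-- Loop characterisation: starting at power = 2^j (j ≥ 2) with accumulator k.
theorem henselLoop_char (r mod : Int) (h4 : 4 ≤ mod) :
    ∀ (d j : Nat) (k : Int), 2 ≤ j → PySem.Int.bitLength mod + 2 - j ≤ d →
      henselLoop r mod k (2 ^ j) = k + max 0 (loopBound r mod - j + 1) := by
  intro d
  induction d with
  | zero =>
    intro j k hj hd
    have hB3 := bitLength_ge_three mod h4
    have hple : ¬ (2 : Int) ^ j ≤ mod := fun h =>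
      absurd ((pow_le_iff_le_bitLength mod h4 j).mp h) (by omega)
    rw [henselLoop_eq r mod k _ (pow_pos (by norm_num) j), if_neg hple]
    have hS := loopBound_lt r mod j (by omega)
    omega
  | succ d ih =>
    intro j k hj hd
    by_cases hjL : j ≤ PySem.Int.bitLength mod - 1
    · -- loop condition holds
      have hple : (2 : Int) ^ j ≤ mod := (pow_le_iff_le_bitLength mod h4 j).mpr hjL
      have hppos : (0 : Int) < 2 ^ j := pow_pos (by norm_num) j
      rw [henselLoop_eq r mod k _ hppos, if_pos hple]
      by_cases htest : PySem.Int.mod r (2 ^ j) = 2 ^ j - 1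
      · rw [if_pos htest]
        have hdvd : (2 : Int) ^ j ∣ (r + 1) := (pymod_eq_sub_one_iff r _ hppos).mp htest
        have hjS : (j : Int) ≤ loopBound r mod := by
          unfold loopBound
          have hc : (j : Int) ≤ ((PySem.Int.bitLength mod - 1 : Nat) : Int) :=
            Nat.cast_le.mpr hjL
          by_cases hr : r = -1
          · rw [if_pos hr]; exact hc
          · rw [if_neg hr]
            have h1 : (j : Int) ≤ twoAdic (r + 1) :=
              (twoAdic_dvd_iff (r + 1) (by omega) j).mp hdvd
            omega
        have hpow : (2 : Int) ^ j * 2 = 2 ^ (j + 1) := by rw [pow_succ]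
        rw [hpow, ih (j + 1) (k + 1) (by omega) (by omega)]
        push_cast
        omega
      · rw [if_neg htest]
        have hnd : ¬ (2 : Int) ^ j ∣ (r + 1) := fun hdvd =>
          htest ((pymod_eq_sub_one_iff r _ hppos).mpr hdvd)
        have hr : r ≠ -1 := by
          intro hr; apply hnd; rw [hr]; simp
        have hS : loopBound r mod < (j : Int) := by
          unfold loopBound
          rw [if_neg hr]
          have := (twoAdic_dvd_iff (r + 1) (by omega) j).not.mp hnd
          omega
        omega
    · -- 2^j > mod: loop exits immediately
      have hple : ¬ (2 : Int) ^ j ≤ mod := fun h =>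
        hjL ((pow_le_iff_le_bitLength mod h4 j).mp h)
      rw [henselLoop_eq r mod k _ (pow_pos (by norm_num) j), if_neg hple]
      have hS := loopBound_lt r mod j (by omega)
      omega

-- ===== VERDICT (by name: the statement is the Claim_ definition above) =====
theorem hensel_prediction_spec : Claim_equal_hensel_prediction := by
  intro r mod _dom
  unfold Spec_hensel_prediction hensel_prediction hensel_prediction_alt
  by_cases h4 : mod < 4
  · rw [if_pos h4, henselLoop_eq r mod 0 4 (by norm_num), if_neg (by omega)]
  · rw [if_neg h4]
    rw [not_lt] at h4
    have hB3 := bitLength_ge_three mod h4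
    have h42 : (4 : Int) = 2 ^ 2 := by norm_num
    rw [h42, henselLoop_char r mod h4 (PySem.Int.bitLength mod) 2 0 (by omega) (by omega)]
    have hcast : ((PySem.Int.bitLength mod - 1 : Nat) : Int)
        = (PySem.Int.bitLength mod : Int) - 1 := by omega
    unfold loopBound
    by_cases hr : r = -1
    · rw [if_pos hr, if_pos hr]
      omega
    · rw [if_neg hr, if_neg hr]
      have h2 := twoAdic_nonneg (r + 1)
      omega
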